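-- pv_equiv track=rewrite | github.com/DaveRoox/AdventOfCode | 2023/day11.py | find_offsets
-- ===== SOURCE A (Python) =====
-- def find_offsets(grid, offset):
--     rows, cols = [0], [0]
--     for i in range(len(grid)):
--         rows.append(rows[-1])
--         if all(cell == '.' for cell in grid[i]):
--             rows[-1] += offset
--     for j in range(len(grid[0])):
--         cols.append(cols[-1])
--         if all(grid[i][j] == '.' for i in range(len(grid))):
--             cols[-1] += offset
--     return rows[1:], cols[1:]
-- ===== SOURCE B (Python) =====
-- def find_offsets(grid, offset):
--     # Record the sorted indices of the empty rows / columns, then compute each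
--     # output entry independently as offset * (rank of that position in the index
--     # list), where rank is found by binary search -- no running accumulator.
--     empty_rows = [i for i in range(len(grid)) if all(c == '.' for c in grid[i])]
--     empty_cols = [j for j in range(len(grid[0])) if all(row[j] == '.' for row in grid)]
--
--     def rank(idx, x):
--         # number of recorded indices <= x, by binary search (bisect_right)
--         lo, hi = 0, len(idx)
--         while lo < hi:
--             mid = (lo + hi) // 2
--             if idx[mid] <= x:
--                 lo = mid + 1
--             else:
--                 hi = mid
--         return lo
--
--     rows = [offset * rank(empty_rows, i) for i in range(len(grid))]
--     cols = [offset * rank(empty_cols, j) for j in range(len(grid[0]))]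
--     return rows, cols
-- ===== Notes on version B (the rewrite author's own statement) =====
-- stated objective: alternative
-- what changed: B stores the sorted index lists of the empty rows and empty columns and computes every output entry independently as offset times a hand-written binary-search rank (bisect_right) into that index list, whereas A maintains a running accumulator in a growing list whose last element it mutates and slices.
import Mathlib
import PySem

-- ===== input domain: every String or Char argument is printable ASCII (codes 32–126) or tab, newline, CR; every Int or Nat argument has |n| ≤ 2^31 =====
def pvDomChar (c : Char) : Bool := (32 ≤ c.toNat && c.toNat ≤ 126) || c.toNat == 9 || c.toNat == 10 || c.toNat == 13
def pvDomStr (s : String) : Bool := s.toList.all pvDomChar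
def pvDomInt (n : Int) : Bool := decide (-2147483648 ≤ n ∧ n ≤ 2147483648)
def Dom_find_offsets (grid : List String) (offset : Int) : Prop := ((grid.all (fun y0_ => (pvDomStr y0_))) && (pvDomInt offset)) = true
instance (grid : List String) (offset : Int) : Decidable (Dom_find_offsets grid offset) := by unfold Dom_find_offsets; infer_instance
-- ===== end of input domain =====

-- B records the sorted index lists of the empty rows/columns and computes each output entry
-- independently as offset * (binary-search rank of the position in that index list), instead of
-- A's running accumulator kept in a growing list (objective: alternative). Returns agree on Pre_.

-- ===== PORT A =====
def find_offsets (grid : List String) (offset : Int) : List Int × List Int :=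
  let rows := (PySem.List.pyRange 0 (grid.length : Int) 1).foldl
    (fun rows i =>
      let rows := rows ++ [PySem.List.pyGetD rows (-1) 0]
      if ((PySem.List.pyGetD grid i "").toList.all (fun cell => cell == '.')) then
        PySem.List.slice rows none (some (-1)) ++ [PySem.List.pyGetD rows (-1) 0 + offset]
      else rows) [0]
  let cols := (PySem.List.pyRange 0 (((PySem.List.pyGetD grid 0 "").toList.length : Int)) 1).foldl
    (fun cols j =>
      let cols := cols ++ [PySem.List.pyGetD cols (-1) 0]
      if ((PySem.List.pyRange 0 (grid.length : Int) 1).all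
            (fun i => PySem.List.pyGetD (PySem.List.pyGetD grid i "").toList j '.' == '.')) then
        PySem.List.slice cols none (some (-1)) ++ [PySem.List.pyGetD cols (-1) 0 + offset]
      else cols) [0]
  (PySem.List.slice rows (some 1) none, PySem.List.slice cols (some 1) none)

-- ===== PORT B =====
-- helper `rank` of Source B: hand-written binary search (lo/hi are Python ints that stay ≥ 0, so Nat;
-- idx[mid] is ported with a default — exact, since 0 ≤ mid < hi ≤ len(idx) whenever it is read)
def pvRank (idx : List Int) (x : Int) (lo hi : Nat) : Nat :=
  if lo < hi then
    let mid := (lo + hi) / 2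
    if PySem.List.pyGetD idx (mid : Int) 0 ≤ x then pvRank idx x (mid + 1) hi
    else pvRank idx x lo mid
  else lo
termination_by hi - lo
decreasing_by all_goals omega

def find_offsets_alt (grid : List String) (offset : Int) : List Int × List Int :=
  let empty_rows : List Int := (PySem.List.pyRange 0 (grid.length : Int) 1).filter
    (fun i => (PySem.List.pyGetD grid i "").toList.all (fun c => c == '.'))
  let empty_cols : List Int := (PySem.List.pyRange 0 (((PySem.List.pyGetD grid 0 "").toList.length : Int)) 1).filter
    (fun j => grid.all (fun row => PySem.List.pyGetD row.toList j '.' == '.'))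
  let rows := (PySem.List.pyRange 0 (grid.length : Int) 1).map
    (fun i => offset * ((pvRank empty_rows i 0 empty_rows.length : Nat) : Int))
  let cols := (PySem.List.pyRange 0 (((PySem.List.pyGetD grid 0 "").toList.length : Int)) 1).map
    (fun j => offset * ((pvRank empty_cols j 0 empty_cols.length : Nat) : Int))
  (rows, cols)

-- ===== PRECONDITION & SPEC =====
-- Pre_ excludes exactly the inputs on which A raises IndexError: the empty grid (grid[0]),
-- and ragged grids where the column scan reaches grid[i][j] with row i shorter than j+1
-- before any earlier row shows a non-'.' in column j.
def Pre_find_offsets (grid : List String) (offset : Int) : Prop :=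
  grid ≠ [] ∧
  ∀ j < (grid.getD 0 "").toList.length, ∀ k < grid.length,
    (grid.getD k "").toList.length ≤ j →
    ∃ i < k, (grid.getD i "").toList.length ≤ j ∨
      ¬ ((grid.getD i "").toList.getD j '.' = '.')
instance (grid : List String) (offset : Int) : Decidable (Pre_find_offsets grid offset) := by
  unfold Pre_find_offsets; infer_instance

def pvWitness_find_offsets : List String × Int := (["#.", ".."], 2)

def Spec_find_offsets (grid : List String) (offset : Int) (out : List Int × List Int) : Prop := out = find_offsets_alt grid offset
instance (grid : List String) (offset : Int) (out : List Int × List Int) : Decidable (Spec_find_offsets grid offset out) := by unfold Spec_find_offsets; infer_instance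

-- ===== CLAIM (what is proved, stated in full; the proofs are below) =====
def Claim_equal_find_offsets : Prop := ∀ (grid : List String) (offset : Int), Dom_find_offsets grid offset → Pre_find_offsets grid offset → Spec_find_offsets grid offset (find_offsets grid offset)

-- ===== LEMMAS AND PROOFS =====

-- proof helper: the running prefix list both sides are shown equal to
def pvPrefix (offset : Int) : List Bool → Int → List Int
  | [], _ => []
  | e :: es, acc =>
    let acc := if e then acc + offset else acc
    acc :: pvPrefix offset es acc

-- the shared loop body of A's two loops, as a function of the emptiness boolean
def pvStep (offset : Int) (rs : List Int) (b : Bool) : List Int :=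
  let rs := rs ++ [PySem.List.pyGetD rs (-1) 0]
  if b then PySem.List.slice rs none (some (-1)) ++ [PySem.List.pyGetD rs (-1) 0 + offset]
  else rs

lemma pvStep_eq (offset : Int) (rs : List Int) (b : Bool) (acc : Int)
    (h : rs.getLast? = some acc) :
    pvStep offset rs b = rs ++ [if b then acc + offset else acc] := by
  have hne : rs ≠ [] := by intro hnil; simp [hnil] at h
  have hlast : PySem.List.pyGetD rs (-1) 0 = acc := by
    rw [PySem.List.pyGetD_neg_one rs 0 hne]
    have h2 : rs.getLast? = some (rs.getLast hne) := List.getLast?_eq_some_getLast hne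
    exact Option.some_injective _ (by rw [← h, h2])
  unfold pvStep
  cases b with
  | false => simp [hlast]
  | true =>
    simp only [hlast, if_pos]
    rw [PySem.List.slice_to_neg_one, List.dropLast_concat,
        PySem.List.pyGetD_neg_one_append_singleton]

lemma pvStep_foldl (offset : Int) :
    ∀ (bs : List Bool) (rs : List Int) (acc : Int), rs.getLast? = some acc →
      bs.foldl (pvStep offset) rs = rs ++ pvPrefix offset bs acc := by
  intro bs
  induction bs with
  | nil => intro rs acc _; simp [pvPrefix]
  | cons b bs ih =>
    intro rs acc h
    have hstep := pvStep_eq offset rs b acc h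
    simp only [List.foldl_cons, hstep]
    rw [ih (rs ++ [if b then acc + offset else acc]) (if b then acc + offset else acc)
        (by simp)]
    simp [pvPrefix]

-- A's range-based column-emptiness test equals B's row-iteration form
lemma colEmpty_eq (grid : List String) (j : Int) :
    (PySem.List.pyRange 0 (grid.length : Int) 1).all
      (fun i => PySem.List.pyGetD (PySem.List.pyGetD grid i "").toList j '.' == '.')
    = grid.all (fun row => PySem.List.pyGetD row.toList j '.' == '.') := by
  conv_rhs => rw [← PySem.List.map_pyGetD_pyRange_zero' grid ""]
  rw [List.all_map]
  rfl

-- counting over positions equals counting over the list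
lemma countP_range_getD {α : Type} (l : List α) (d : α) (p : α → Bool) :
    (List.range l.length).countP (fun m => p (l.getD m d)) = l.countP p := by
  induction l with
  | nil => simp
  | cons a l ih =>
    have hfun : ((fun m => p ((a :: l).getD m d)) ∘ Nat.succ) = (fun m => p (l.getD m d)) := by
      funext m; simp
    rw [List.length_cons, List.range_succ_eq_map, List.countP_cons, List.countP_map, hfun, ih,
      List.countP_cons]
    simp

-- binary-search correctness on a position-monotone list
lemma pvRank_eq_count (E : List Int) (x : Int)
    (hmono : ∀ a b : Nat, a ≤ b → b < E.length → E.getD a 0 ≤ E.getD b 0) :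
    ∀ (k lo hi : Nat), hi - lo = k → lo ≤ hi → hi ≤ E.length →
      pvRank E x lo hi = lo + (List.range' lo (hi - lo)).countP (fun m => decide (E.getD m 0 ≤ x)) := by
  intro k
  induction k using Nat.strong_induction_on with
  | _ k ih =>
    intro lo hi hk hle hlen
    rw [pvRank]
    by_cases hlt : lo < hi
    · simp only [if_pos hlt, PySem.List.pyGetD_natCast]
      have hgd : E.getD ((lo + hi) / 2) 0 = E.getD ((lo + hi) / 2) 0 := rfl
      by_cases hc : E.getD ((lo + hi) / 2) 0 ≤ x
      · rw [if_pos hc]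
        rw [ih (hi - ((lo + hi) / 2 + 1)) (by omega) ((lo + hi) / 2 + 1) hi rfl (by omega) hlen]
        have hsplit : List.range' lo (hi - lo)
            = List.range' lo ((lo + hi) / 2 + 1 - lo) ++ List.range' ((lo + hi) / 2 + 1) (hi - ((lo + hi) / 2 + 1)) := by
          have h0 := List.range'_append (s := lo) (m := (lo + hi) / 2 + 1 - lo)
            (n := hi - ((lo + hi) / 2 + 1)) (step := 1)
          have h1 : lo + 1 * ((lo + hi) / 2 + 1 - lo) = (lo + hi) / 2 + 1 := by omega
          have h2 : ((lo + hi) / 2 + 1 - lo) + (hi - ((lo + hi) / 2 + 1)) = hi - lo := by omega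
          rw [h1, h2] at h0
          exact h0.symm
        rw [hsplit, List.countP_append]
        have hall : (List.range' lo ((lo + hi) / 2 + 1 - lo)).countP
            (fun m => decide (E.getD m 0 ≤ x)) = (lo + hi) / 2 + 1 - lo := by
          have hall' : ∀ a ∈ List.range' lo ((lo + hi) / 2 + 1 - lo),
              (fun m => decide (E.getD m 0 ≤ x)) a = true := by
            intro a ha
            rw [List.mem_range'_1] at ha
            have hle2 : E.getD a 0 ≤ E.getD ((lo + hi) / 2) 0 :=
              hmono a ((lo + hi) / 2) (by omega) (by omega)
            simp only [decide_eq_true_eq]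
            exact le_trans hle2 hc
          have h := List.countP_eq_length.mpr hall'
          rw [List.length_range'] at h
          exact h
        omega
      · rw [if_neg hc]
        push Not at hc
        rw [ih ((lo + hi) / 2 - lo) (by omega) lo ((lo + hi) / 2) rfl (by omega) (by omega)]
        have hsplit : List.range' lo (hi - lo)
            = List.range' lo ((lo + hi) / 2 - lo) ++ List.range' ((lo + hi) / 2) (hi - (lo + hi) / 2) := by
          have h0 := List.range'_append (s := lo) (m := (lo + hi) / 2 - lo)
            (n := hi - (lo + hi) / 2) (step := 1)
          have h1 : lo + 1 * ((lo + hi) / 2 - lo) = (lo + hi) / 2 := by omega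
          have h2 : ((lo + hi) / 2 - lo) + (hi - (lo + hi) / 2) = hi - lo := by omega
          rw [h1, h2] at h0
          exact h0.symm
        rw [hsplit, List.countP_append]
        have hzero : (List.range' ((lo + hi) / 2) (hi - (lo + hi) / 2)).countP
            (fun m => decide (E.getD m 0 ≤ x)) = 0 := by
          apply List.countP_eq_zero.mpr
          intro a ha
          rw [List.mem_range'_1] at ha
          have hge : E.getD ((lo + hi) / 2) 0 ≤ E.getD a 0 :=
            hmono ((lo + hi) / 2) a (by omega) (by omega)
          simp only [decide_eq_true_eq]
          omega
        omega
    · have h0 : hi - lo = 0 := by omega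
      simp [if_neg hlt, h0]

lemma pvRank_count (E : List Int) (x : Int)
    (hmono : ∀ a b : Nat, a ≤ b → b < E.length → E.getD a 0 ≤ E.getD b 0) :
    pvRank E x 0 E.length = E.countP (fun e => decide (e ≤ x)) := by
  have h := pvRank_eq_count E x hmono (E.length - 0) 0 E.length rfl (Nat.zero_le _) le_rfl
  rw [h, Nat.sub_zero, ← List.range_eq_range']
  have h2 := countP_range_getD E 0 (fun e => decide (e ≤ x))
  rw [← h2]
  simp

-- counting (j ≤ k) ∧ p j over range m = counting p over range (k+1), for k < m
lemma countP_range_le (p : Nat → Bool) (m k : Nat) (h : k < m) :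
    (List.range m).countP (fun j => decide (j ≤ k) && p j) = (List.range (k + 1)).countP p := by
  have hsplit : List.range m = List.range (k + 1) ++ List.range' (k + 1) (m - (k + 1)) := by
    rw [List.range_eq_range', List.range_eq_range' (n := k + 1)]
    have h0 := List.range'_append (s := 0) (m := k + 1) (n := m - (k + 1)) (step := 1)
    have h1 : 0 + 1 * (k + 1) = k + 1 := by omega
    have h2 : (k + 1) + (m - (k + 1)) = m := by omega
    rw [h1, h2] at h0
    exact h0.symm
  rw [hsplit, List.countP_append]
  have h2 : (List.range' (k + 1) (m - (k + 1))).countP (fun j => decide (j ≤ k) && p j) = 0 := by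
    apply List.countP_eq_zero.mpr
    intro j hj
    rw [List.mem_range'_1] at hj
    simp only [Bool.and_eq_true, decide_eq_true_eq, not_and]
    intro hle
    omega
  have h1 : (List.range (k + 1)).countP (fun j => decide (j ≤ k) && p j)
      = (List.range (k + 1)).countP p := by
    apply List.countP_congr
    intro j hj
    rw [List.mem_range] at hj
    have : j ≤ k := by omega
    simp [this]
  omega

-- pvPrefix as independent per-position counts
lemma pvPrefix_eq_counts (offset : Int) :
    ∀ (flags : List Bool) (acc : Int),
      pvPrefix offset flags acc
        = (List.range flags.length).map
            (fun i => acc + offset * (((flags.take (i + 1)).countP id : Nat) : Int)) := by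
  intro flags
  induction flags with
  | nil => intro acc; simp [pvPrefix]
  | cons f fs ih =>
    intro acc
    rw [List.length_cons, List.range_succ_eq_map, List.map_cons, List.map_map]
    show pvPrefix offset (f :: fs) acc = _ :: _
    rw [pvPrefix]
    have hhead : (if f then acc + offset else acc)
        = acc + offset * ((((f :: fs).take (0 + 1)).countP id : Nat) : Int) := by
      cases f <;> simp
    rw [ih (if f then acc + offset else acc)]
    refine congrArg₂ _ hhead ?_
    apply List.map_congr_left
    intro i hi
    simp only [Function.comp]
    have htake : ((f :: fs).take (Nat.succ i + 1)).countP id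
        = (fs.take (i + 1)).countP id + (if f then 1 else 0) := by
      rw [List.take_succ_cons, List.countP_cons]
      cases f <;> simp [id]
    rw [htake]
    cases f <;> simp <;> ring

-- the master bridge: B's rank-map equals A's prefix list, for any index predicate q on range m
lemma master (q : Int → Bool) (m : Nat) (offset : Int) :
    (PySem.List.pyRange 0 (m : Int) 1).map
      (fun i => offset * ((pvRank ((PySem.List.pyRange 0 (m : Int) 1).filter q) i 0
          ((PySem.List.pyRange 0 (m : Int) 1).filter q).length : Nat) : Int))
    = pvPrefix offset ((PySem.List.pyRange 0 (m : Int) 1).map q) 0 := by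
  rw [PySem.List.pyRange_zero_nat m]
  set qc : Nat → Bool := fun k => q (k : Int) with hqc
  have hfm : ((List.range m).map (fun k : Nat => (k : Int))).filter q
      = ((List.range m).filter qc).map (fun k : Nat => (k : Int)) := List.filter_map
  rw [hfm, List.map_map, List.map_map]
  -- the filtered index list is position-monotone
  have hpair : (((List.range m).filter qc).map (fun k : Nat => (k : Int))).Pairwise (· < ·) := by
    apply List.Pairwise.map
    · intro a b hab
      exact hab
    · exact (List.Pairwise.filter qc
        (by simpa using (List.pairwise_lt_range (n := m)) : (List.range m).Pairwise (fun a b : Nat => (a : Int) < (b : Int))))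
  have hmono : ∀ a b : Nat, a ≤ b →
      b < (((List.range m).filter qc).map (fun k : Nat => (k : Int))).length →
      (((List.range m).filter qc).map (fun k : Nat => (k : Int))).getD a 0
        ≤ (((List.range m).filter qc).map (fun k : Nat => (k : Int))).getD b 0 := by
    intro a b hab hb
    rcases Nat.lt_or_ge a b with h | h
    · rw [List.pairwise_iff_getElem] at hpair
      have := hpair a b (by omega) hb h
      rw [List.getD_eq_getElem _ _ (by omega), List.getD_eq_getElem _ _ hb]
      exact le_of_lt this
    · have : a = b := by omega
      rw [this]
  rw [pvPrefix_eq_counts offset]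
  conv_rhs => rw [List.length_map, List.length_range]
  apply List.map_congr_left
  intro k hk
  rw [List.mem_range] at hk
  simp only [Function.comp]
  rw [pvRank_count _ _ hmono]
  -- rank = count of indices ≤ k = count of qc over range (k+1)
  rw [List.countP_map]
  have hswap : (((List.range m).filter qc).countP
      (fun j : Nat => decide (((j : Nat) : Int) ≤ (k : Int))))
      = ((List.range m).filter qc).countP (fun j : Nat => decide (j ≤ k)) := by
    apply List.countP_congr
    intro j _
    simp
  simp only [Function.comp_def]
  rw [hswap, List.countP_filter, countP_range_le qc m k hk]
  -- the take side
  have htake : (((List.range m).map qc).take (k + 1)).countP id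
      = (List.range (k + 1)).countP qc := by
    rw [← List.map_take, List.take_range]
    have hmin : min (k + 1) m = k + 1 := by omega
    rw [hmin, List.countP_map]
    apply List.countP_congr
    intro j _
    simp [id]
  rw [← hqc, htake]
  ring

theorem ports_eq (grid : List String) (offset : Int) :
    find_offsets grid offset = find_offsets_alt grid offset := by
  unfold find_offsets find_offsets_alt
  dsimp only
  have hflagsrow : (PySem.List.pyRange 0 (grid.length : Int) 1).map
      (fun i => (PySem.List.pyGetD grid i "").toList.all (fun c => c == '.'))
      = grid.map (fun row => row.toList.all (fun c => c == '.')) := by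
    conv_rhs => rw [← PySem.List.map_pyGetD_pyRange_zero' grid ""]
    rw [List.map_map]
    rfl
  have hrows :
      (PySem.List.pyRange 0 (grid.length : Int) 1).foldl
        (fun rows i =>
          let rows' := rows ++ [PySem.List.pyGetD rows (-1) 0]
          if ((PySem.List.pyGetD grid i "").toList.all (fun cell => cell == '.')) then
            PySem.List.slice rows' none (some (-1)) ++ [PySem.List.pyGetD rows' (-1) 0 + offset]
          else rows') [0]
      = [0] ++ pvPrefix offset ((PySem.List.pyRange 0 (grid.length : Int) 1).map
          (fun i => (PySem.List.pyGetD grid i "").toList.all (fun c => c == '.'))) 0 := by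
    calc (PySem.List.pyRange 0 (grid.length : Int) 1).foldl
          (fun rows i => pvStep offset rows ((PySem.List.pyGetD grid i "").toList.all (fun cell => cell == '.'))) [0]
        = ((PySem.List.pyRange 0 (grid.length : Int) 1).map
            (fun i => (PySem.List.pyGetD grid i "").toList.all (fun c => c == '.'))).foldl
            (pvStep offset) [0] := List.foldl_map.symm
      _ = _ := pvStep_foldl offset _ [0] 0 rfl
  have hcols :
      (PySem.List.pyRange 0 (((PySem.List.pyGetD grid 0 "").toList.length : Int)) 1).foldl
        (fun cols j =>
          let cols' := cols ++ [PySem.List.pyGetD cols (-1) 0]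
          if ((PySem.List.pyRange 0 (grid.length : Int) 1).all
                (fun i => PySem.List.pyGetD (PySem.List.pyGetD grid i "").toList j '.' == '.')) then
            PySem.List.slice cols' none (some (-1)) ++ [PySem.List.pyGetD cols' (-1) 0 + offset]
          else cols') [0]
      = [0] ++ pvPrefix offset
          ((PySem.List.pyRange 0 (((PySem.List.pyGetD grid 0 "").toList.length : Int)) 1).map
            (fun j => grid.all (fun row => PySem.List.pyGetD row.toList j '.' == '.'))) 0 := by
    calc (PySem.List.pyRange 0 (((PySem.List.pyGetD grid 0 "").toList.length : Int)) 1).foldl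
          (fun cols j => pvStep offset cols
            ((PySem.List.pyRange 0 (grid.length : Int) 1).all
              (fun i => PySem.List.pyGetD (PySem.List.pyGetD grid i "").toList j '.' == '.'))) [0]
        = (PySem.List.pyRange 0 (((PySem.List.pyGetD grid 0 "").toList.length : Int)) 1).foldl
            (fun cols j => pvStep offset cols
              (grid.all (fun row => PySem.List.pyGetD row.toList j '.' == '.'))) [0] := by
          simp only [colEmpty_eq]
      _ = ((PySem.List.pyRange 0 (((PySem.List.pyGetD grid 0 "").toList.length : Int)) 1).map
            (fun j => grid.all (fun row => PySem.List.pyGetD row.toList j '.' == '.'))).foldl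
            (pvStep offset) [0] := List.foldl_map.symm
      _ = _ := pvStep_foldl offset _ [0] 0 rfl
  rw [hrows, hcols]
  rw [master (fun i => (PySem.List.pyGetD grid i "").toList.all (fun c => c == '.')) grid.length offset]
  rw [master (fun j => grid.all (fun row => PySem.List.pyGetD row.toList j '.' == '.'))
      (PySem.List.pyGetD grid 0 "").toList.length offset]
  simp [PySem.List.slice_from_one]

-- ===== VERDICT (by name: the statement is the Claim_ definition above) =====
theorem find_offsets_spec : Claim_equal_find_offsets := by
  intro grid offset _ _
  unfold Spec_find_offsets
  exact ports_eq grid offset
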